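-- pv_equiv track=rewrite | github.com/Zara8170/song_ai | recommendation_service.py | _merge_small_groups
-- ===== SOURCE A (Python) =====
-- def _merge_small_groups(grouped: dict[str, list[dict]], min_size: int = 3) -> dict[str, list[dict]]:
--     if not grouped: return grouped
--     big = {k:v for k,v in grouped.items() if len(v) >= min_size}
--     small = {k:v for k,v in grouped.items() if len(v) <  min_size}
--     if not small: return grouped
--     def _sim(a,b):
--         a,b=a.lower(),b.lower()
--         return 2 if a==b else (1 if (a in b or b in a) else 0)
--     for k, songs in small.items():
--         best, best_s = None, -1
--         for kk in big.keys():
--             s = _sim(k, kk)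
--             if s > best_s:
--                 best, best_s = kk, s
--         if best is None and big:
--             best = next(iter(big.keys()))
--         if best:
--             big[best] = (big.get(best, []) + songs)[:6]
--         else:
--             big[k] = songs
--     return big
-- ===== SOURCE B (Python) =====
-- def _merge_small_groups(grouped: dict[str, list[dict]], min_size: int = 3) -> dict[str, list[dict]]:
--     if not grouped:
--         return grouped
--     big = {k: v for k, v in grouped.items() if len(v) >= min_size}
--     small = {k: v for k, v in grouped.items() if len(v) < min_size}
--     if not small:
--         return grouped
--     # exact-match index: lowercased big key -> first original key with that lowercase
--     index = {}
--     for kk in big: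
--         index.setdefault(kk.lower(), kk)
--     for k, songs in small.items():
--         if not big:
--             big[k] = songs
--             index.setdefault(k.lower(), k)
--             continue
--         lk = k.lower()
--         best = index.get(lk)
--         if best is None:
--             for kk in big:
--                 kl = kk.lower()
--                 if lk in kl or kl in lk:
--                     best = kk
--                     break
--             else:
--                 best = next(iter(big))
--         if best:
--             big[best] = (big.get(best, []) + songs)[:6]
--         else:
--             big[k] = songs
--             index.setdefault(lk, k)
--     return big
-- ===== Notes on version B (the rewrite author's own statement) =====
-- stated objective: alternative
-- what changed: Replaces the full argmax scan over all big keys (computing a similarity score for every pair) with a tiered early-exit search: a lowercase exact-match index dict maintained across iterations answers score-2 matches in one lookup, otherwise a scan breaks at the first substring containment, otherwise the first big key is used.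
import Mathlib
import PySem

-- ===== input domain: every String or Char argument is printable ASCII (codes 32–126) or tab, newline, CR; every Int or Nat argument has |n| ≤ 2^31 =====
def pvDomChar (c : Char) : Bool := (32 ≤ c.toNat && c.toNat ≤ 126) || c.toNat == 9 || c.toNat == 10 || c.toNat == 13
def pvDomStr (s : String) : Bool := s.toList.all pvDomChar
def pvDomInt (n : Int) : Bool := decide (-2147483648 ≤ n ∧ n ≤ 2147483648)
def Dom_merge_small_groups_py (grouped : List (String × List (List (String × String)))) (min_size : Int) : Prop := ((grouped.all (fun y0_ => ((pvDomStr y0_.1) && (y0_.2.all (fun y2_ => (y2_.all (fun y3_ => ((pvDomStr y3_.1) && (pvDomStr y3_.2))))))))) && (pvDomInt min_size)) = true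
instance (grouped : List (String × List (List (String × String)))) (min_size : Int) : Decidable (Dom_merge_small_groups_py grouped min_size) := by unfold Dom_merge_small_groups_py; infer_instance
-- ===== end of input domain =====

-- B replaces A's full argmax scan (scoring every big key) by a tiered early-exit search: a lowercase
-- exact-match index dict (maintained as big grows) answers score-2 matches in one lookup, otherwise the
-- first substring-containment key wins, otherwise the first big key.  Objective: alternative decomposition.
-- Both ports decode the dict argument with PySem.Dict.ofList (Python dict literal semantics: first
-- position, last value for a duplicated key), exactly the conversion the caller's dict performs.

-- ===== PORT A =====
-- _sim(a, b)
def pvSim (a b : String) : Int :=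
  let a' := PySem.Str.lower a
  let b' := PySem.Str.lower b
  if a' == b' then 2 else if PySem.Str.isIn a' b' || PySem.Str.isIn b' a' then 1 else 0

-- the inner 'for kk in big.keys()' argmax loop, from an arbitrary running state
def pvBestFold (k : String) (ks : List String) (st : Option String × Int) : Option String × Int :=
  ks.foldl (fun st kk =>
    let s := pvSim k kk
    if st.2 < s then (some kk, s) else st) st

-- body of 'for k, songs in small.items()'
def pvStepA (big : PySem.Dict String (List (List (String × String))))
    (kv : String × List (List (String × String))) : PySem.Dict String (List (List (String × String))) :=
  let k := kv.1
  let songs := kv.2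
  let st := pvBestFold k big.keys (none, -1)
  let best := if st.1 = none ∧ big.size ≠ 0 then big.keys.head? else st.1
  match best with
  | some b =>
    if b ≠ "" then big.insert b (PySem.List.slice (big.getD b [] ++ songs) none (some 6))
    else big.insert k songs
  | none => big.insert k songs

def merge_small_groups_py (grouped : List (String × List (List (String × String)))) (min_size : Int) : List (String × List (List (String × String))) :=
  let g := PySem.Dict.ofList grouped
  if g.items = [] then g.items else
  let big := PySem.Dict.ofList (g.items.filter (fun kv => min_size ≤ (kv.2.length : Int)))
  let small := g.items.filter (fun kv => (kv.2.length : Int) < min_size)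
  if small = [] then g.items else
  (small.foldl pvStepA big).items

-- ===== PORT B =====
-- index.setdefault registrations: lowercase key -> first original key
def pvBuildIdx (ks : List String) : PySem.Dict String String :=
  ks.foldl (fun d kk => d.setdefault (PySem.Str.lower kk) kk) PySem.Dict.empty

-- B's candidate selection: index lookup, then first-containment scan, then first key
def pvBestB (index : PySem.Dict String String) (ks : List String) (lk : String) : Option String :=
  match index.get? lk with
  | some b => some b
  | none =>
    match ks.find? (fun kk =>
        let kl := PySem.Str.lower kk
        PySem.Str.isIn lk kl || PySem.Str.isIn kl lk) with
    | some kk => some kk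
    | none => ks.head?

-- body of B's 'for k, songs in small.items()' over the state (big, index)
def pvStepB (st : PySem.Dict String (List (List (String × String))) × PySem.Dict String String)
    (kv : String × List (List (String × String))) :
    PySem.Dict String (List (List (String × String))) × PySem.Dict String String :=
  let big := st.1
  let index := st.2
  let k := kv.1
  let songs := kv.2
  if big.size = 0 then (big.insert k songs, index.setdefault (PySem.Str.lower k) k)
  else
    let lk := PySem.Str.lower k
    match pvBestB index big.keys lk with
    | some b =>
      if b ≠ "" then (big.insert b (PySem.List.slice (big.getD b [] ++ songs) none (some 6)), index)
      else (big.insert k songs, index.setdefault lk k)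
    | none => (big.insert k songs, index.setdefault lk k)

def merge_small_groups_py_alt (grouped : List (String × List (List (String × String)))) (min_size : Int) : List (String × List (List (String × String))) :=
  let g := PySem.Dict.ofList grouped
  if g.items = [] then g.items else
  let big := PySem.Dict.ofList (g.items.filter (fun kv => min_size ≤ (kv.2.length : Int)))
  let small := g.items.filter (fun kv => (kv.2.length : Int) < min_size)
  if small = [] then g.items else
  let index := pvBuildIdx big.keys
  (small.foldl pvStepB (big, index)).1.items

-- ===== PRECONDITION & SPEC =====
def Spec_merge_small_groups_py (grouped : List (String × List (List (String × String)))) (min_size : Int) (out : List (String × List (List (String × String)))) : Prop := out = merge_small_groups_py_alt grouped min_size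
instance (grouped : List (String × List (List (String × String)))) (min_size : Int) (out : List (String × List (List (String × String)))) : Decidable (Spec_merge_small_groups_py grouped min_size out) := by unfold Spec_merge_small_groups_py; infer_instance

-- ===== CLAIM (what is proved, stated in full; the proofs are below) =====
def Claim_equal_merge_small_groups_py : Prop := ∀ (grouped : List (String × List (List (String × String)))) (min_size : Int), Dom_merge_small_groups_py grouped min_size → Spec_merge_small_groups_py grouped min_size (merge_small_groups_py grouped min_size)

-- ===== LEMMAS AND PROOFS =====

-- A's argmax over scores in {0,1,2} picks the first score-2 key, else the first score-1 key, else the first key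
def pvTiered (k : String) (ks : List String) : Option String :=
  match ks.find? (fun kk => pvSim k kk == 2) with
  | some kk => some kk
  | none =>
    match ks.find? (fun kk => pvSim k kk == 1) with
    | some kk => some kk
    | none => ks.head?

theorem pvSim_cases (a b : String) : pvSim a b = 0 ∨ pvSim a b = 1 ∨ pvSim a b = 2 := by
  unfold pvSim; dsimp only; split_ifs <;> simp

theorem pvSim_two_bool (a b : String) :
    (pvSim a b == 2) = (PySem.Str.lower b == PySem.Str.lower a) := by
  unfold pvSim; dsimp only
  rcases eq_or_ne (PySem.Str.lower a) (PySem.Str.lower b) with h | h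
  · simp [h]
  · simp only [beq_iff_eq, h, if_false]
    split_ifs <;> simp [Ne.symm h]

theorem pvSim_one_of_not_two (a b : String) (h : (pvSim a b == 2) = false) :
    (pvSim a b == 1) =
      (PySem.Str.isIn (PySem.Str.lower a) (PySem.Str.lower b) ||
       PySem.Str.isIn (PySem.Str.lower b) (PySem.Str.lower a)) := by
  unfold pvSim at h ⊢; dsimp only at h ⊢
  rcases eq_or_ne (PySem.Str.lower a) (PySem.Str.lower b) with he | he
  · simp [he] at h
  · simp only [beq_iff_eq, he, if_false] at h ⊢
    split_ifs with hc
    · rw [hc]; decide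
    · rw [Bool.not_eq_true] at hc
      rw [hc]; decide

theorem pvFind?_congr {α : Type} (p q : α → Bool) (l : List α)
    (h : ∀ x ∈ l, p x = q x) : l.find? p = l.find? q := by
  induction l with
  | nil => rfl
  | cons x t ih =>
    simp only [List.find?_cons, h x (by simp)]
    cases hq : q x with
    | true => rfl
    | false => exact ih (fun y hy => h y (by simp [hy]))

theorem pvBestFold_two (k b : String) (ks : List String) :
    pvBestFold k ks (some b, 2) = (some b, 2) := by
  induction ks with
  | nil => rfl
  | cons kk t ih =>
    simp only [pvBestFold, List.foldl_cons] at *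
    rcases pvSim_cases k kk with h | h | h <;> simp [h] <;> exact ih

theorem pvBestFold_one (k b : String) (ks : List String) :
    pvBestFold k ks (some b, 1) =
      match ks.find? (fun kk => pvSim k kk == 2) with
      | some kk => (some kk, 2)
      | none => (some b, 1) := by
  induction ks with
  | nil => rfl
  | cons kk t ih =>
    simp only [pvBestFold, List.foldl_cons, List.find?_cons] at *
    rcases pvSim_cases k kk with h | h | h <;>
      simp only [h, show ((0:Int) == 2) = false by decide,
        show ((1:Int) == 2) = false by decide, show ((2:Int) == 2) = true by decide] <;>
      norm_num
    · exact ih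
    · exact ih
    · exact pvBestFold_two k kk t

theorem pvBestFold_zero (k b : String) (ks : List String) :
    pvBestFold k ks (some b, 0) =
      match ks.find? (fun kk => pvSim k kk == 2) with
      | some kk => (some kk, 2)
      | none =>
        match ks.find? (fun kk => pvSim k kk == 1) with
        | some kk => (some kk, 1)
        | none => (some b, 0) := by
  induction ks with
  | nil => rfl
  | cons kk t ih =>
    simp only [pvBestFold, List.foldl_cons, List.find?_cons] at *
    rcases pvSim_cases k kk with h | h | h <;>
      simp only [h, show ((0:Int) == 2) = false by decide, show ((0:Int) == 1) = false by decide,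
        show ((1:Int) == 2) = false by decide, show ((1:Int) == 1) = true by decide,
        show ((2:Int) == 2) = true by decide] <;>
      norm_num
    · exact ih
    · exact pvBestFold_one k kk t
    · exact pvBestFold_two k kk t

theorem pvBestFold_start (k : String) (ks : List String) :
    (pvBestFold k ks (none, -1)).1 = pvTiered k ks := by
  cases ks with
  | nil => rfl
  | cons kk t =>
    have hlt : (-1 : Int) < pvSim k kk := by
      rcases pvSim_cases k kk with h | h | h <;> rw [h] <;> decide
    have h0 : pvBestFold k (kk :: t) (none, -1) = pvBestFold k t (some kk, pvSim k kk) := by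
      simp only [pvBestFold, List.foldl_cons]
      rw [if_pos hlt]
    rw [h0]
    unfold pvTiered
    rcases pvSim_cases k kk with h | h | h
    · rw [h, pvBestFold_zero]
      simp only [List.find?_cons, h, show ((0:Int) == 2) = false by decide,
        show ((0:Int) == 1) = false by decide, List.head?]
      cases hf2 : t.find? (fun kk => pvSim k kk == 2) <;>
        cases hf1 : t.find? (fun kk => pvSim k kk == 1) <;> rfl
    · rw [h, pvBestFold_one]
      simp only [List.find?_cons, h, show ((1:Int) == 2) = false by decide,
        show ((1:Int) == 1) = true by decide]
      cases hf2 : t.find? (fun kk => pvSim k kk == 2) <;> rfl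
    · rw [h, pvBestFold_two]
      simp only [List.find?_cons, h, show ((2:Int) == 2) = true by decide]

theorem pvTiered_mem (k b : String) (ks : List String) (h : pvTiered k ks = some b) : b ∈ ks := by
  unfold pvTiered at h
  cases hf2 : ks.find? (fun kk => pvSim k kk == 2) with
  | some x => rw [hf2] at h; cases h; exact List.mem_of_find?_eq_some hf2
  | none =>
    rw [hf2] at h
    cases hf1 : ks.find? (fun kk => pvSim k kk == 1) with
    | some x => rw [hf1] at h; cases h; exact List.mem_of_find?_eq_some hf1
    | none => rw [hf1] at h; exact List.mem_of_mem_head? h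

theorem pvTiered_ne_nil (k : String) (ks : List String) (h : ks ≠ []) :
    pvTiered k ks ≠ none := by
  unfold pvTiered
  cases hf2 : ks.find? (fun kk => pvSim k kk == 2) with
  | some x => simp
  | none =>
    cases hf1 : ks.find? (fun kk => pvSim k kk == 1) with
    | some x => simp
    | none => simpa [List.head?_eq_none_iff] using h

theorem pvBuildIdx_get?_aux (ks : List String) (d : PySem.Dict String String) (l : String) :
    (ks.foldl (fun d kk => d.setdefault (PySem.Str.lower kk) kk) d).get? l
      = Option.or (d.get? l) (ks.find? (fun kk => PySem.Str.lower kk == l)) := by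
  induction ks generalizing d with
  | nil => simp
  | cons kk t ih =>
    simp only [List.foldl_cons, List.find?_cons]
    rw [ih]
    rcases eq_or_ne (PySem.Str.lower kk) l with hl | hl
    · subst hl
      rw [PySem.Dict.get?_setdefault_self]
      simp only [beq_self_eq_true]
      cases hd : d.get? (PySem.Str.lower kk) <;> simp [Option.or]
    · rw [PySem.Dict.get?_setdefault_of_ne d kk (Ne.symm hl)]
      have : (PySem.Str.lower kk == l) = false := by simp [hl]
      rw [this]

theorem pvBuildIdx_get? (ks : List String) (l : String) :
    (pvBuildIdx ks).get? l = ks.find? (fun kk => PySem.Str.lower kk == l) := by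
  unfold pvBuildIdx
  rw [pvBuildIdx_get?_aux]
  simp [PySem.Dict.get?_empty, Option.or]

theorem pvBuildIdx_append_singleton (ks : List String) (k : String) :
    pvBuildIdx (ks ++ [k]) = (pvBuildIdx ks).setdefault (PySem.Str.lower k) k := by
  unfold pvBuildIdx
  rw [List.foldl_append]
  rfl

theorem pvBuildIdx_contains_of_mem (ks : List String) (k : String) (h : k ∈ ks) :
    (pvBuildIdx ks).contains (PySem.Str.lower k) = true := by
  rw [PySem.Dict.contains_eq_isSome_get?, pvBuildIdx_get?]
  rw [List.find?_isSome]
  exact ⟨k, h, by simp⟩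

theorem pvBestB_eq (k : String) (ks : List String) :
    pvBestB (pvBuildIdx ks) ks (PySem.Str.lower k) = pvTiered k ks := by
  unfold pvBestB
  rw [pvBuildIdx_get?,
    pvFind?_congr _ (fun kk => pvSim k kk == 2) ks (fun x _ => (pvSim_two_bool k x).symm)]
  unfold pvTiered
  cases hf2 : ks.find? (fun kk => pvSim k kk == 2) with
  | some x => rfl
  | none =>
    have hall := List.find?_eq_none.mp hf2
    rw [pvFind?_congr _ (fun kk => pvSim k kk == 1) ks
      (fun x hx => (pvSim_one_of_not_two k x (by simpa using hall x hx)).symm)]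

theorem pvStep_eq (big : PySem.Dict String (List (List (String × String))))
    (kv : String × List (List (String × String))) :
    pvStepB (big, pvBuildIdx big.keys) kv = (pvStepA big kv, pvBuildIdx (pvStepA big kv).keys) := by
  by_cases hsz : big.size = 0
  · have hkeys : big.keys = [] := by
      have h0 : big.items = [] := List.length_eq_zero_iff.mp hsz
      simp [PySem.Dict.keys, h0]
    have hcont : big.contains kv.1 = false := by
      cases hc : big.contains kv.1 with
      | false => rfl
      | true => exact absurd ((PySem.Dict.contains_iff_mem_keys big kv.1).mp hc) (by simp [hkeys])
    have hA : pvStepA big kv = big.insert kv.1 kv.2 := by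
      unfold pvStepA
      rw [hkeys]
      simp [pvBestFold, hsz]
    simp only [pvStepB]
    rw [if_pos hsz, hA, PySem.Dict.keys_insert_of_not_contains big kv.2 hcont, hkeys]
    rfl
  · have hne : big.keys ≠ [] := by
      intro h
      apply hsz
      simpa [PySem.Dict.size, PySem.Dict.keys] using congrArg List.length h
    obtain ⟨b, htier⟩ : ∃ b, pvTiered kv.1 big.keys = some b := by
      cases ht : pvTiered kv.1 big.keys with
      | none => exact absurd ht (pvTiered_ne_nil _ _ hne)
      | some b => exact ⟨b, rfl⟩
    have hmem : b ∈ big.keys := pvTiered_mem _ _ _ htier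
    have hA : pvStepA big kv =
        (if b ≠ "" then
          big.insert b (PySem.List.slice (big.getD b [] ++ kv.2) none (some 6))
        else big.insert kv.1 kv.2) := by
      simp only [pvStepA]
      rw [pvBestFold_start, htier]
      simp
    simp only [pvStepB]
    rw [if_neg hsz, pvBestB_eq, htier]
    by_cases hb : b = ""
    · subst hb
      rw [hA]
      simp only [ne_eq, not_true_eq_false, if_false]
      by_cases hc : big.contains kv.1 = true
      · rw [PySem.Dict.keys_insert_of_contains big kv.2 hc,
          PySem.Dict.setdefault_of_contains _ _
            (pvBuildIdx_contains_of_mem _ _ ((PySem.Dict.contains_iff_mem_keys big kv.1).mp hc))]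
      · rw [PySem.Dict.keys_insert_of_not_contains big kv.2 (by simpa using hc),
          pvBuildIdx_append_singleton]
    · rw [hA]
      simp only [hb, ne_eq, not_false_eq_true, if_true]
      rw [PySem.Dict.keys_insert_of_contains big _ ((PySem.Dict.contains_iff_mem_keys big b).mpr hmem)]

theorem pvLoop (small : List (String × List (List (String × String))))
    (big : PySem.Dict String (List (List (String × String)))) :
    small.foldl pvStepB (big, pvBuildIdx big.keys)
      = (small.foldl pvStepA big, pvBuildIdx (small.foldl pvStepA big).keys) := by
  induction small generalizing big with
  | nil => rfl
  | cons kv t ih => simp only [List.foldl_cons, pvStep_eq, ih]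

-- ===== VERDICT (by name: the statement is the Claim_ definition above) =====
theorem merge_small_groups_py_spec : Claim_equal_merge_small_groups_py := by
  intro grouped min_size _
  unfold Spec_merge_small_groups_py merge_small_groups_py merge_small_groups_py_alt
  simp only []
  split_ifs with h1 h2
  · rfl
  · rfl
  · rw [pvLoop]
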